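-- pv_equiv track=rewrite | github.com/jacobhal/kattis | candlebox/solution.py | candles_to_remove
-- ===== SOURCE A (Python) =====
-- def candles_to_remove(D, R, T):
--     rita_age = 4
--     theo_age = 3
--
--     # Define arrays with years where no candles were put into boxes
--     theo = [0] * 100
--     rita = [0] * 100
--     # Fill the arrays with the sum series where indices correspond to the years of Theo and Rita
--     # Rita: [0, 0, 0, 0, 4, 9, 15, 22...], Theo: [0, 0, 0, 3, 7, 12, 18...]
--     for i in range(len(theo)):
--         if i >= rita_age:
--             rita[i] = rita[i-1] + i
--         if i >= theo_age:
--             theo[i] = theo[i-1] + i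
--
--     for i in range(D, len(theo)):
--         # If we find ages for Theo and Rita with the specified age difference that matches the sum of candles we are done
--         # We return the total amount of candles in Rita's box subtracted by the correct amount of candles at her age
--         if (theo[i-D] + rita[i] == R + T):
--             return R - rita[i]
-- ===== SOURCE B (Python) =====
-- def candles_to_remove(D, R, T):
--     for i in range(D, 100):
--         rita = i * (i + 1) // 2 - 6 if i >= 4 else 0
--         j = i - D
--         theo = j * (j + 1) // 2 - 3 if j >= 3 else 0
--         if rita + theo == R + T:
--             return R - rita
--     return None
-- ===== Notes on version B (the rewrite author's own statement) =====
-- stated objective: simpler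
-- what changed: Drops both precomputed length-100 prefix-sum arrays and the table-building loop; the single search loop over range(D,100) evaluates Rita's and Theo's cumulative candle counts directly by the arithmetic-series closed forms i*(i+1)//2-6 (i>=4) and j*(j+1)//2-3 (j>=3).
-- outside the precondition, e.g. on candles_to_remove(-1, 4944, 0): A returns 0, B returns None; on candles_to_remove(-5, 0, 0): A raises IndexError, B returns 0
import Mathlib
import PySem

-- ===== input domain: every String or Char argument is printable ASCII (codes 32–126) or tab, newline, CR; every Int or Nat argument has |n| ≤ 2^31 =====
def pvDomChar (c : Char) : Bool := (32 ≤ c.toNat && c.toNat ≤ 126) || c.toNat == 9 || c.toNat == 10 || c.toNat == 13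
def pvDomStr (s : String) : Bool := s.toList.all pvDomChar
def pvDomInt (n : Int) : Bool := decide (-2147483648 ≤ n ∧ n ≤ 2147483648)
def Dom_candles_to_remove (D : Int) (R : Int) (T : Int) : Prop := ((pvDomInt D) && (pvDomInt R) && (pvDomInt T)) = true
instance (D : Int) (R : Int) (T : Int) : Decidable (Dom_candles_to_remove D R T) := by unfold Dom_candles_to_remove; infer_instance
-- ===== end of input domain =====

-- B replaces A's two precomputed prefix-sum arrays by closed-form arithmetic-series formulas in a single loop (objective: simpler).

-- ===== PORT A =====
-- the table-building loop: for i in range(100): if i>=4: rita[i]=rita[i-1]+i; if i>=3: theo[i]=theo[i-1]+i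
-- (all indices i, i-1 used here lie in [0,99], so the total forms pyGetD/pySetD are exact)
def ctrBuild : List Int × List Int :=
  (PySem.List.pyRange 0 100 1).foldl (fun st i =>
    let theo := st.1
    let rita := st.2
    let rita := if 4 ≤ i then PySem.List.pySetD rita i (PySem.List.pyGetD rita (i - 1) 0 + i) else rita
    let theo := if 3 ≤ i then PySem.List.pySetD theo i (PySem.List.pyGetD theo (i - 1) 0 + i) else theo
    (theo, rita)) (List.replicate 100 (0 : Int), List.replicate 100 (0 : Int))

-- the search loop with early return; pyGet? = none is Python's IndexError (excluded by Pre_)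
def ctrLoop (theo rita : List Int) (D R T : Int) : List Int → Option Int
  | [] => none
  | i :: rest =>
    match PySem.List.pyGet? theo (i - D), PySem.List.pyGet? rita i with
    | some t, some r => if t + r = R + T then some (R - r) else ctrLoop theo rita D R T rest
    | _, _ => none

def candles_to_remove (D : Int) (R : Int) (T : Int) : Option Int :=
  let theo := ctrBuild.1
  let rita := ctrBuild.2
  ctrLoop theo rita D R T (PySem.List.pyRange D 100 1)

-- ===== PORT B =====
def ctrAltLoop (D R T : Int) : List Int → Option Int
  | [] => none
  | i :: rest =>
    let rita := if 4 ≤ i then PySem.Int.floordiv (i * (i + 1)) 2 - 6 else 0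
    let j := i - D
    let theo := if 3 ≤ j then PySem.Int.floordiv (j * (j + 1)) 2 - 3 else 0
    if rita + theo = R + T then some (R - rita) else ctrAltLoop D R T rest

def candles_to_remove_alt (D : Int) (R : Int) (T : Int) : Option Int :=
  ctrAltLoop D R T (PySem.List.pyRange D 100 1)

-- ===== PRECONDITION & SPEC =====
-- Pre_ excludes negative D, on which A's fixed length-100 arrays make the search loop either raise
-- IndexError or return accidental values via Python's negative-index wraparound.
def Pre_candles_to_remove (D : Int) (R : Int) (T : Int) : Prop := 0 ≤ D
instance (D : Int) (R : Int) (T : Int) : Decidable (Pre_candles_to_remove D R T) := by unfold Pre_candles_to_remove; infer_instance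

def pvWitness_candles_to_remove : Int × Int × Int := (4, 10, 6)

def Spec_candles_to_remove (D : Int) (R : Int) (T : Int) (out : Option Int) : Prop := out = candles_to_remove_alt D R T
instance (D : Int) (R : Int) (T : Int) (out : Option Int) : Decidable (Spec_candles_to_remove D R T out) := by unfold Spec_candles_to_remove; infer_instance

-- ===== CLAIM (what is proved, stated in full; the proofs are below) =====
def Claim_equal_candles_to_remove : Prop := ∀ (D : Int) (R : Int) (T : Int), Dom_candles_to_remove D R T → Pre_candles_to_remove D R T → Spec_candles_to_remove D R T (candles_to_remove D R T)

-- ===== LEMMAS AND PROOFS =====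

-- B's closed forms, as functions, and their tabulations (used only by the proofs)
def ritaCF (i : Int) : Int := if 4 ≤ i then PySem.Int.floordiv (i * (i + 1)) 2 - 6 else 0
def theoCF (j : Int) : Int := if 3 ≤ j then PySem.Int.floordiv (j * (j + 1)) 2 - 3 else 0
def theoTab : List Int := (PySem.List.pyRange 0 100 1).map theoCF
def ritaTab : List Int := (PySem.List.pyRange 0 100 1).map ritaCF

-- the arrays A builds are exactly the closed forms tabulated on [0,100)
set_option maxRecDepth 40000 in
lemma ctrBuild_eq : ctrBuild = (theoTab, ritaTab) := by decide

lemma get_map_cf (f : Int → Int) (i : Int) (h0 : 0 ≤ i) (h1 : i < 100) :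
    PySem.List.pyGet? ((PySem.List.pyRange 0 100 1).map f) i = some (f i) := by
  obtain ⟨k, rfl⟩ : ∃ k : Nat, i = (k : Int) := ⟨i.toNat, by omega⟩
  have hk : k < 100 := by omega
  rw [PySem.List.pyGet?_natCast]
  exact_mod_cast PySem.List.getElem?_map_pyRange_zero f 100 k hk

lemma loop_eq (D R T : Int) (hD : 0 ≤ D) (l : List Int)
    (hl : ∀ i ∈ l, D ≤ i ∧ i < 100) :
    ctrLoop theoTab ritaTab D R T l = ctrAltLoop D R T l := by
  induction l with
  | nil => rfl
  | cons i rest ih =>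
    obtain ⟨hDi, hi⟩ := hl i (List.mem_cons_self ..)
    have ht : PySem.List.pyGet? theoTab (i - D) = some (theoCF (i - D)) :=
      get_map_cf theoCF (i - D) (by omega) (by omega)
    have hr : PySem.List.pyGet? ritaTab i = some (ritaCF i) :=
      get_map_cf ritaCF i (by omega) (by omega)
    have ih' := ih (fun j hj => hl j (List.mem_cons_of_mem _ hj))
    rw [ctrLoop, ht, hr, ctrAltLoop]
    show (if theoCF (i - D) + ritaCF i = R + T then some (R - ritaCF i)
          else ctrLoop theoTab ritaTab D R T rest)
       = (if ritaCF i + theoCF (i - D) = R + T then some (R - ritaCF i)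
          else ctrAltLoop D R T rest)
    by_cases hc : ritaCF i + theoCF (i - D) = R + T
    · rw [if_pos hc, if_pos (by rw [add_comm]; exact hc)]
    · rw [if_neg (fun h => hc (by rw [add_comm]; exact h)), if_neg hc]
      exact ih'

-- ===== VERDICT (by name: the statement is the Claim_ definition above) =====
theorem candles_to_remove_spec : Claim_equal_candles_to_remove := by
  intro D R T _ hPre
  unfold Spec_candles_to_remove candles_to_remove candles_to_remove_alt
  rw [ctrBuild_eq]
  exact loop_eq D R T hPre _ (fun i hi => (PySem.List.mem_pyRange_one.mp hi))
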